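-- pv_equiv track=rewrite | github.com/RomeroLab/schemarecomb | src/ggrecomb/breakpoints.py | _get_valid_patterns
-- ===== SOURCE A (Python) =====
-- def _get_valid_patterns(
--     cdn_sets: list[set[str]],
--     reverse: bool = False
-- ) -> tuple[set[str], set[str], set[str]]:
--     """DNA patterns in the codon alignment for Golden Gate site construction.
--
--     Helper function for _calculate_breakpoints. Each input set corresponds to
--     the valid codons that encode a given amino acid at a given position in the
--     parent alignment.  For example, if a certain position has isoleucine and
--     threonine, and the valid codons for these amino acids are ('ATT', 'ATC')
--     and ('ACC', 'ACT'), respectively, ({'ATT', 'ATC'), {'ACC', 'ACT'}) will be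
--     passed in. The length 1, 2, and 3 patterns are returned. See the example
--     below for more information.
--
--     Args:
--         cnd_sets: Collections of codons that code for each amino acids at a
--             given site in the parent alignment.
--         reverse: If the patterns should be explored right to left instead of
--             right to left (default).
--
--     Returns:
--         Collections of all length 1, 2, and 3 patterns found.
--
--     Example:
--         _get_valid_patterns(({'ATT', 'ATC'}, {'ACC', 'ACT'})) will return
--             ({'A'}, {}, {}) since 'A' can be found as the first letter at least
--             once in each set. There are no length 2 patterns because there are
--             no common letters at the second codon position.
--         _get_valid_patterns(({'ATT', 'ATC'}, {'ACC', 'ACT'}), True) will return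
--             ({'C', 'T'}, {}, {}) since 'C' and 'T' can both be found as the
--             last letter at least once in each set.
--     """
--
--     if not cdn_sets:
--         raise ValueError('cdn_sets must not be empty.')
--
--     # If your codons are not three bases long, you're either wrong or doing
--     # xenobiology.
--     if not all(all(len(cdn) == 3 for cdn in cdn_set) for cdn_set in cdn_sets):
--         raise ValueError('Codons should be three bases long.')
--
--     # If not reverse, cdn_shrink removes the right side letter of each codon.
--     # If reverse, cdn_shrink removes the left side letter of each codon.
--     fwd_lim, bwd_lim = int(reverse), 1 - int(reverse)
--
--     def cdn_shrink(cdns: set[str]) -> set[str]: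
--         return {cdn[fwd_lim:len(cdn)-bwd_lim] for cdn in cdns}
--
--     # 1 AA per codon, so len 3 patterns exist iff len(cdn_sets) == 1.
--     if len(cdn_sets) == 1:
--         return set(), set(), set(cdn_sets[0])
--
--     # Remove a codon letter and take intersection to get all len 2 patterns.
--     cdn_sets = [cdn_shrink(cdns) for cdns in cdn_sets]
--     len_2_sets = set.intersection(*cdn_sets)
--
--     # Remove another letter and take intersection to get all len 1 patterns.
--     cdn_sets = [cdn_shrink(cdns) for cdns in cdn_sets]
--     len_1_sets = set.intersection(*cdn_sets)
--
--     return len_1_sets, len_2_sets, set()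
-- ===== SOURCE B (Python) =====
-- def _get_valid_patterns(
--     cdn_sets: list[set[str]],
--     reverse: bool = False
-- ) -> tuple[set[str], set[str], set[str]]:
--     """One counting pass over the codon sets instead of repeated shrink+intersection."""
--     if not cdn_sets:
--         raise ValueError('cdn_sets must not be empty.')
--
--     if not all(all(len(cdn) == 3 for cdn in cdn_set) for cdn_set in cdn_sets):
--         raise ValueError('Codons should be three bases long.')
--
--     if len(cdn_sets) == 1:
--         return set(), set(), set(cdn_sets[0])
--
--     n = len(cdn_sets)
--     count1: dict[str, int] = {}
--     count2: dict[str, int] = {}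
--     for cdn_set in cdn_sets:
--         if reverse:
--             s2 = {cdn[1:] for cdn in cdn_set}
--             s1 = {cdn[2:] for cdn in cdn_set}
--         else:
--             s2 = {cdn[:2] for cdn in cdn_set}
--             s1 = {cdn[:1] for cdn in cdn_set}
--         for p in s1:
--             count1[p] = count1.get(p, 0) + 1
--         for p in s2:
--             count2[p] = count2.get(p, 0) + 1
--
--     len_1_sets = {p for p, c in count1.items() if c == n}
--     len_2_sets = {p for p, c in count2.items() if c == n}
--     return len_1_sets, len_2_sets, set()
-- ===== Notes on version B (the rewrite author's own statement) =====
-- stated objective: alternative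
-- what changed: Replaces A's two rounds of per-set shrinking plus variadic set.intersection with a single counting pass that records, per length-1 and length-2 slice, how many codon sets contain it, keeping the slices whose count equals the number of sets.
import Mathlib
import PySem

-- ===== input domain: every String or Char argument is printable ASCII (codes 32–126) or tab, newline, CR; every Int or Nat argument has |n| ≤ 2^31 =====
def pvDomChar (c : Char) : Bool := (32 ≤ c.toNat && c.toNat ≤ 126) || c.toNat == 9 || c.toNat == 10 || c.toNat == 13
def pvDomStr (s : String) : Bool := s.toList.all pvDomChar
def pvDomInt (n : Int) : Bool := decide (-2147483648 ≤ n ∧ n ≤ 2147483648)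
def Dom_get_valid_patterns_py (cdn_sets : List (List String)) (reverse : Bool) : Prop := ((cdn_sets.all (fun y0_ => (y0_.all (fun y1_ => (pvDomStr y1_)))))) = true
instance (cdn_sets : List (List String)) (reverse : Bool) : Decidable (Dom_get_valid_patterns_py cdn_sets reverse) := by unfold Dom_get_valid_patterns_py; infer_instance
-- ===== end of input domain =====

-- B replaces A's two rounds of set-shrinking plus variadic set.intersection with one counting
-- pass over the codon sets (per-slice dicts counting in how many sets each slice occurs);
-- objective: alternative decomposition, same asymptotic cost.

-- ===== PORT A =====
-- {cdn[fwd_lim:len(cdn)-bwd_lim] for cdn in cdns}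
def pvShrink (fwd bwd : Int) (cdns : List String) : PySem.Set String :=
  PySem.Set.ofList (cdns.map (fun cdn => PySem.Str.slice cdn (some fwd) (some (PySem.Str.len cdn - bwd))))

-- set.intersection(*sets); sets is nonempty wherever A calls it
def pvIntersectAll (sets : List (List String)) : List String :=
  match sets with
  | [] => []
  | s :: rest => rest.foldl PySem.Set.inter s

def get_valid_patterns_py (cdn_sets : List (List String)) (reverse : Bool) : List String × List String × List String :=
  if cdn_sets = [] then ([], [], [])  -- Python: raise ValueError (excluded by Pre_)
  else if !(cdn_sets.all (fun cdn_set => cdn_set.all (fun cdn => PySem.Str.len cdn == 3))) then ([], [], [])  -- raise ValueError (excluded by Pre_)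
  else
    let fwd : Int := if reverse then 1 else 0
    let bwd : Int := 1 - fwd
    if cdn_sets.length = 1 then ([], [], PySem.Set.ofList (cdn_sets.headD []))
    else
      let sets2 := cdn_sets.map (pvShrink fwd bwd)
      let len_2_sets := pvIntersectAll sets2
      let sets1 := sets2.map (fun cdns => pvShrink fwd bwd cdns)
      let len_1_sets := pvIntersectAll sets1
      (len_1_sets, len_2_sets, [])

-- ===== PORT B =====
def get_valid_patterns_py_alt (cdn_sets : List (List String)) (reverse : Bool) : List String × List String × List String :=
  if cdn_sets = [] then ([], [], [])  -- raise ValueError (excluded by Pre_)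
  else if !(cdn_sets.all (fun cdn_set => cdn_set.all (fun cdn => PySem.Str.len cdn == 3))) then ([], [], [])  -- raise ValueError (excluded by Pre_)
  else if cdn_sets.length = 1 then ([], [], PySem.Set.ofList (cdn_sets.headD []))
  else
    let n : Int := cdn_sets.length
    -- for cdn_set in cdn_sets: build the two per-set slice sets, bump both count dicts
    let counts := cdn_sets.foldl
      (fun (cnts : PySem.Dict String Int × PySem.Dict String Int) cdn_set =>
        let s1 : PySem.Set String :=
          if reverse then PySem.Set.ofList (cdn_set.map (fun cdn => PySem.Str.slice cdn (some 2) none))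
          else PySem.Set.ofList (cdn_set.map (fun cdn => PySem.Str.slice cdn none (some 1)))
        let s2 : PySem.Set String :=
          if reverse then PySem.Set.ofList (cdn_set.map (fun cdn => PySem.Str.slice cdn (some 1) none))
          else PySem.Set.ofList (cdn_set.map (fun cdn => PySem.Str.slice cdn none (some 2)))
        (s1.foldl (fun d p => d.insert p (d.getD p 0 + 1)) cnts.1,
         s2.foldl (fun d p => d.insert p (d.getD p 0 + 1)) cnts.2))
      (PySem.Dict.empty, PySem.Dict.empty)
    let len_1_sets := PySem.Set.ofList ((counts.1.items.filter (fun pc => pc.2 == n)).map (fun pc => pc.1))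
    let len_2_sets := PySem.Set.ofList ((counts.2.items.filter (fun pc => pc.2 == n)).map (fun pc => pc.1))
    (len_1_sets, len_2_sets, [])

-- ===== PRECONDITION & SPEC =====
-- Pre_ excludes exactly the inputs on which A raises ValueError: the empty list, and any codon not 3 characters long.
def Pre_get_valid_patterns_py (cdn_sets : List (List String)) (reverse : Bool) : Prop :=
  cdn_sets ≠ [] ∧ ∀ cdn_set ∈ cdn_sets, ∀ cdn ∈ cdn_set, PySem.Str.len cdn = 3
instance (cdn_sets : List (List String)) (reverse : Bool) : Decidable (Pre_get_valid_patterns_py cdn_sets reverse) := by unfold Pre_get_valid_patterns_py; infer_instance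

def pvWitness_get_valid_patterns_py : List (List String) × Bool := ([["ATT", "ATC"], ["ACC", "ACT"]], false)

def Spec_get_valid_patterns_py (cdn_sets : List (List String)) (reverse : Bool) (out : List String × List String × List String) : Prop := out = get_valid_patterns_py_alt cdn_sets reverse
instance (cdn_sets : List (List String)) (reverse : Bool) (out : List String × List String × List String) : Decidable (Spec_get_valid_patterns_py cdn_sets reverse out) := by unfold Spec_get_valid_patterns_py; infer_instance

-- ===== CLAIM (what is proved, stated in full; the proofs are below) =====
def Claim_equal_get_valid_patterns_py : Prop := ∀ (cdn_sets : List (List String)) (reverse : Bool), Dom_get_valid_patterns_py cdn_sets reverse → Pre_get_valid_patterns_py cdn_sets reverse → Spec_get_valid_patterns_py cdn_sets reverse (get_valid_patterns_py cdn_sets reverse)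

-- ===== LEMMAS AND PROOFS =====

theorem pvStrExt {s t : String} (h : s.toList = t.toList) : s = t := String.ext (by simpa using h)

theorem pvLenToList {c : String} (h : PySem.Str.len c = 3) : c.toList.length = 3 := by
  rw [PySem.Str.len_eq] at h; exact_mod_cast h

-- folding set.intersection over a list of sets filters the first set by membership in the rest
theorem pvFoldlInter (rest : List (List String)) : ∀ s : List String,
    rest.foldl PySem.Set.inter s = s.filter (fun x => rest.all (fun t => t.contains x)) := by
  induction rest with
  | nil => intro s; simp
  | cons t rest ih =>
    intro s
    rw [List.foldl_cons, ih]
    show (PySem.Set.inter s t).filter _ = _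
    simp only [PySem.Set.inter, List.filter_filter, List.all_cons]
    exact List.filter_congr (fun x _ => by simp [Bool.and_comm])

-- occurrences of k across a flattened list of duplicate-free lists = number of lists containing k
theorem pvCountFlatten (Ms : List (List String)) (k : String) (hnd : ∀ M ∈ Ms, M.Nodup) :
    Ms.flatten.count k = Ms.countP (fun M => M.contains k) := by
  induction Ms with
  | nil => simp
  | cons M Ms ih =>
    simp only [List.flatten_cons, List.count_append, List.countP_cons]
    rw [ih (fun M h => hnd M (List.mem_cons_of_mem _ h))]
    by_cases hk : k ∈ M
    · rw [List.count_eq_one_of_mem (hnd M List.mem_cons_self) hk]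
      simp [hk, Nat.add_comm]
    · rw [List.count_eq_zero_of_not_mem hk]
      simp [hk]

-- dedup after map commutes with dedup before map
theorem pvOfListMapOfList {α β : Type} [BEq α] [LawfulBEq α] [BEq β] [LawfulBEq β]
    (g : α → β) (xs : List α) :
    PySem.Set.ofList ((PySem.Set.ofList xs).map g) = PySem.Set.ofList (xs.map g) := by
  induction xs using List.reverseRecOn with
  | nil => rfl
  | append_singleton xs x ih =>
    rw [PySem.Set.ofList_append_singleton]
    simp only [List.map_append, List.map_cons, List.map_nil]
    rw [PySem.Set.ofList_append_singleton]
    by_cases hx : x ∈ xs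
    · rw [PySem.Set.add_of_mem ((PySem.Set.mem_ofList xs x).mpr hx), ih,
        PySem.Set.add_of_mem ((PySem.Set.mem_ofList (xs.map g) (g x)).mpr (List.mem_map_of_mem hx))]
    · rw [PySem.Set.add_of_not_mem (fun hc => hx ((PySem.Set.mem_ofList xs x).mp hc))]
      simp only [List.map_append, List.map_cons, List.map_nil]
      rw [PySem.Set.ofList_append_singleton, ih]

-- CORE: intersection of duplicate-free lists = keys of the flatten-counter whose count is the number of lists
theorem pvInterEqCounter (Ms : List (List String)) (hne : Ms ≠ []) (hnd : ∀ M ∈ Ms, M.Nodup) :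
    pvIntersectAll Ms =
      PySem.Set.ofList (((PySem.Dict.counter Ms.flatten).items.filter
        (fun pc => pc.2 == (Ms.length : Int))).map (fun pc => pc.1)) := by
  obtain ⟨M0, rest, rfl⟩ := List.exists_cons_of_ne_nil hne
  rw [PySem.Dict.items_counter, List.filter_map, List.map_map]
  have hmapid : ((fun pc : String × Int => pc.1) ∘ fun k => (k, (List.count k (M0 :: rest).flatten : Int)))
      = fun k => k := rfl
  rw [hmapid, List.map_id']
  -- rewrite the filter predicate into "k is in every list"
  have hpred : ∀ k ∈ PySem.Set.ofList (M0 :: rest).flatten,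
      ((fun pc : String × Int => pc.2 == ((M0 :: rest).length : Int)) ∘
        fun k => (k, (List.count k (M0 :: rest).flatten : Int))) k
      = (M0 :: rest).all (fun t => t.contains k) := by
    intro k _
    show ((List.count k (M0 :: rest).flatten : Int) == ((M0 :: rest).length : Int)) = _
    rw [pvCountFlatten _ k hnd, Bool.eq_iff_iff]
    simp only [beq_iff_eq, Nat.cast_inj, List.countP_eq_length, List.all_eq_true]
  rw [List.filter_congr hpred]
  -- the deduped flatten is M0 followed by elements not in M0; those fail the filter
  have hM0 : M0.Nodup := hnd M0 List.mem_cons_self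
  rw [show (M0 :: rest).flatten = M0 ++ rest.flatten from rfl,
    PySem.Set.ofList_append, PySem.Set.ofList_eq_self_of_nodup M0 hM0,
    PySem.Set.update_eq_append_filter, List.filter_append]
  have htail : (List.filter (fun y => !PySem.Set.contains M0 y) (PySem.Set.ofList rest.flatten)).filter
      (fun k => (M0 :: rest).all (fun t => t.contains k)) = [] := by
    rw [List.filter_eq_nil_iff]
    intro a ha
    have h' := List.of_mem_filter ha
    have hnot : a ∉ M0 := by
      intro hmem
      rw [show PySem.Set.contains M0 a = true from (PySem.Set.contains_iff M0 a).mpr hmem] at h'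
      simp at h'
    simp only [List.all_cons, Bool.and_eq_true, List.contains_iff_mem]
    intro hc
    exact hnot hc.1
  rw [htail, List.append_nil,
    PySem.Set.ofList_eq_self_of_nodup _ (List.Nodup.filter _ hM0)]
  -- on M0 itself the head conjunct is true
  show rest.foldl PySem.Set.inter M0 = _
  rw [pvFoldlInter]
  apply List.filter_congr
  intro x hx
  simp [List.all_cons, hx]

-- the pair-of-dicts loop in B, split and expressed as a counter over the flattened slice sets
theorem pvFoldBumpEqCounter (S : List String → PySem.Set String) (cdn_sets : List (List String)) :
    cdn_sets.foldl (fun d cdn_set => (S cdn_set).foldl (fun d p => d.insert p (d.getD p 0 + 1)) d)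
      PySem.Dict.empty
    = PySem.Dict.counter (cdn_sets.map S).flatten := by
  rw [← PySem.Dict.foldl_insert_getD_add_one_eq_counter, List.foldl_flatten, List.foldl_map]

-- A's shrunk sets equal B's slice sets, elementwise
theorem pvShrinkEq (fwd bwd : Int) (f : String → String) (s : List String)
    (h : ∀ c ∈ s, PySem.Str.slice c (some fwd) (some (PySem.Str.len c - bwd)) = f c) :
    pvShrink fwd bwd s = PySem.Set.ofList (s.map f) := by
  unfold pvShrink
  rw [List.map_congr_left h]

-- A's second shrink, applied to an already-shrunk set, elementwise
theorem pvShrink2Eq (fwd bwd : Int) (f2 f1 : String → String) (s : List String)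
    (h1 : ∀ c ∈ s, PySem.Str.slice (f2 c) (some fwd) (some (PySem.Str.len (f2 c) - bwd)) = f1 c) :
    pvShrink fwd bwd (PySem.Set.ofList (s.map f2)) = PySem.Set.ofList (s.map f1) := by
  unfold pvShrink
  rw [pvOfListMapOfList, List.map_map]
  exact congrArg PySem.Set.ofList (List.map_congr_left (fun c hc => h1 c hc))

-- slice arithmetic on a 3-character codon (A's bounds vs B's bounds)
theorem pvSliceF2 (c : String) (h : PySem.Str.len c = 3) :
    PySem.Str.slice c (some 0) (some (PySem.Str.len c - 1)) = PySem.Str.slice c none (some 2) := by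
  obtain ⟨a, b, d, hc⟩ := List.length_eq_three.mp (pvLenToList h)
  apply pvStrExt
  rw [h]
  simp only [PySem.Str.toList_slice, PySem.Chars.slice_eq_listSlice, hc]
  rfl

theorem pvSliceF1 (c : String) (h : PySem.Str.len c = 3) :
    PySem.Str.slice (PySem.Str.slice c none (some 2)) (some 0)
      (some (PySem.Str.len (PySem.Str.slice c none (some 2)) - 1))
    = PySem.Str.slice c none (some 1) := by
  obtain ⟨a, b, d, hc⟩ := List.length_eq_three.mp (pvLenToList h)
  have ht : (PySem.Str.slice c none (some 2)).toList = [a, b] := by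
    simp only [PySem.Str.toList_slice, PySem.Chars.slice_eq_listSlice, hc]; rfl
  have hlen : PySem.Str.len (PySem.Str.slice c none (some 2)) = 2 := by
    rw [PySem.Str.len_eq, ht]; rfl
  apply pvStrExt
  rw [hlen]
  simp only [PySem.Str.toList_slice, PySem.Chars.slice_eq_listSlice, ht, hc]
  rfl

theorem pvSliceR2 (c : String) (h : PySem.Str.len c = 3) :
    PySem.Str.slice c (some 1) (some (PySem.Str.len c - 0)) = PySem.Str.slice c (some 1) none := by
  obtain ⟨a, b, d, hc⟩ := List.length_eq_three.mp (pvLenToList h)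
  apply pvStrExt
  rw [h]
  simp only [PySem.Str.toList_slice, PySem.Chars.slice_eq_listSlice, hc]
  rfl

theorem pvSliceR1 (c : String) (h : PySem.Str.len c = 3) :
    PySem.Str.slice (PySem.Str.slice c (some 1) none) (some 1)
      (some (PySem.Str.len (PySem.Str.slice c (some 1) none) - 0))
    = PySem.Str.slice c (some 2) none := by
  obtain ⟨a, b, d, hc⟩ := List.length_eq_three.mp (pvLenToList h)
  have ht : (PySem.Str.slice c (some 1) none).toList = [b, d] := by
    simp only [PySem.Str.toList_slice, PySem.Chars.slice_eq_listSlice, hc]; rfl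
  have hlen : PySem.Str.len (PySem.Str.slice c (some 1) none) = 2 := by
    rw [PySem.Str.len_eq, ht]; rfl
  apply pvStrExt
  rw [hlen]
  simp only [PySem.Str.toList_slice, PySem.Chars.slice_eq_listSlice, ht, hc]
  rfl

-- one side of B's output (one slice function f) equals A's intersection of such slice sets
theorem pvSideEq (cdn_sets : List (List String)) (hne : cdn_sets ≠ []) (f : String → String) :
    pvIntersectAll (cdn_sets.map (fun s => PySem.Set.ofList (s.map f))) =
    PySem.Set.ofList (((cdn_sets.foldl
        (fun d cdn_set => (PySem.Set.ofList (cdn_set.map f)).foldl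
          (fun d p => d.insert p (d.getD p 0 + 1)) d) PySem.Dict.empty).items.filter
      (fun pc => pc.2 == (cdn_sets.length : Int))).map (fun pc => pc.1)) := by
  rw [pvFoldBumpEqCounter (fun s => PySem.Set.ofList (s.map f)) cdn_sets]
  have h := pvInterEqCounter (cdn_sets.map (fun s => PySem.Set.ofList (s.map f)))
    (by simpa using hne)
    (by intro M hM
        obtain ⟨s, _, rfl⟩ := List.mem_map.mp hM
        exact PySem.Set.nodup_ofList _)
  rw [h, List.length_map]

-- the general (≥ 2 sets) branch of both ports, written out explicitly
theorem pvMainBranch (cdn_sets : List (List String)) (reverse : Bool) (h1 : cdn_sets ≠ [])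
    (hall : ∀ s ∈ cdn_sets, ∀ c ∈ s, PySem.Str.len c = 3) :
    (pvIntersectAll ((cdn_sets.map (pvShrink (if reverse = true then 1 else 0)
          (1 - (if reverse = true then 1 else 0)))).map
        (fun cdns => pvShrink (if reverse = true then 1 else 0)
          (1 - (if reverse = true then 1 else 0)) cdns)),
     pvIntersectAll (cdn_sets.map (pvShrink (if reverse = true then 1 else 0)
          (1 - (if reverse = true then 1 else 0)))),
     ([] : List String))
    =
    (PySem.Set.ofList (((cdn_sets.foldl
        (fun (cnts : PySem.Dict String Int × PySem.Dict String Int) cdn_set =>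
          ((if reverse = true then PySem.Set.ofList (cdn_set.map (fun cdn => PySem.Str.slice cdn (some 2) none))
            else PySem.Set.ofList (cdn_set.map (fun cdn => PySem.Str.slice cdn none (some 1)))).foldl
              (fun d p => d.insert p (d.getD p 0 + 1)) cnts.1,
           (if reverse = true then PySem.Set.ofList (cdn_set.map (fun cdn => PySem.Str.slice cdn (some 1) none))
            else PySem.Set.ofList (cdn_set.map (fun cdn => PySem.Str.slice cdn none (some 2)))).foldl
              (fun d p => d.insert p (d.getD p 0 + 1)) cnts.2))
        (PySem.Dict.empty, PySem.Dict.empty)).1.items.filter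
          (fun pc => pc.2 == (cdn_sets.length : Int))).map (fun pc => pc.1)),
     PySem.Set.ofList (((cdn_sets.foldl
        (fun (cnts : PySem.Dict String Int × PySem.Dict String Int) cdn_set =>
          ((if reverse = true then PySem.Set.ofList (cdn_set.map (fun cdn => PySem.Str.slice cdn (some 2) none))
            else PySem.Set.ofList (cdn_set.map (fun cdn => PySem.Str.slice cdn none (some 1)))).foldl
              (fun d p => d.insert p (d.getD p 0 + 1)) cnts.1,
           (if reverse = true then PySem.Set.ofList (cdn_set.map (fun cdn => PySem.Str.slice cdn (some 1) none))
            else PySem.Set.ofList (cdn_set.map (fun cdn => PySem.Str.slice cdn none (some 2)))).foldl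
              (fun d p => d.insert p (d.getD p 0 + 1)) cnts.2))
        (PySem.Dict.empty, PySem.Dict.empty)).2.items.filter
          (fun pc => pc.2 == (cdn_sets.length : Int))).map (fun pc => pc.1)),
     ([] : List String)) := by
  cases reverse with
  | false =>
    simp only [Bool.false_eq_true, if_false]
    have hsplit : cdn_sets.foldl
        (fun (cnts : PySem.Dict String Int × PySem.Dict String Int) cdn_set =>
          (List.foldl (fun d p => d.insert p (d.getD p 0 + 1)) cnts.1 (PySem.Set.ofList (List.map (fun cdn => PySem.Str.slice cdn none (some 1)) cdn_set)),
           List.foldl (fun d p => d.insert p (d.getD p 0 + 1)) cnts.2 (PySem.Set.ofList (List.map (fun cdn => PySem.Str.slice cdn none (some 2)) cdn_set))))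
        (PySem.Dict.empty, PySem.Dict.empty)
      = (cdn_sets.foldl (fun d cdn_set => List.foldl (fun d p => d.insert p (d.getD p 0 + 1)) d (PySem.Set.ofList (List.map (fun cdn => PySem.Str.slice cdn none (some 1)) cdn_set))) PySem.Dict.empty,
         cdn_sets.foldl (fun d cdn_set => List.foldl (fun d p => d.insert p (d.getD p 0 + 1)) d (PySem.Set.ofList (List.map (fun cdn => PySem.Str.slice cdn none (some 2)) cdn_set))) PySem.Dict.empty) :=
      PySem.List.foldl_prod_mk
        (fun (d : PySem.Dict String Int) cdn_set => List.foldl (fun d p => d.insert p (d.getD p 0 + 1)) d (PySem.Set.ofList (List.map (fun cdn => PySem.Str.slice cdn none (some 1)) cdn_set)))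
        (fun (d : PySem.Dict String Int) cdn_set => List.foldl (fun d p => d.insert p (d.getD p 0 + 1)) d (PySem.Set.ofList (List.map (fun cdn => PySem.Str.slice cdn none (some 2)) cdn_set)))
        cdn_sets PySem.Dict.empty PySem.Dict.empty
    rw [hsplit]
    dsimp only
    have e2 : ∀ s ∈ cdn_sets, pvShrink 0 (1 - 0) s =
        PySem.Set.ofList (s.map (fun c => PySem.Str.slice c none (some 2))) :=
      fun s hs => pvShrinkEq _ _ _ s (fun c hc => by
        rw [show (1 - 0 : Int) = 1 from rfl]
        exact pvSliceF2 c (hall s hs c hc))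
    have t2 : cdn_sets.map (pvShrink 0 (1 - 0)) =
        cdn_sets.map (fun s => PySem.Set.ofList (s.map (fun c => PySem.Str.slice c none (some 2)))) :=
      List.map_congr_left e2
    have t1 : List.map ((fun cdns => pvShrink 0 (1 - 0) cdns) ∘
          (fun s => PySem.Set.ofList (s.map (fun c => PySem.Str.slice c none (some 2))))) cdn_sets =
        cdn_sets.map (fun s => PySem.Set.ofList (s.map (fun c => PySem.Str.slice c none (some 1)))) :=
      List.map_congr_left (fun s hs => pvShrink2Eq 0 (1 - 0)
        (fun c => PySem.Str.slice c none (some 2)) (fun c => PySem.Str.slice c none (some 1)) s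
        (fun c hc => by
          rw [show (1 - 0 : Int) = 1 from rfl]
          exact pvSliceF1 c (hall s hs c hc)))
    refine congrArg₂ Prod.mk ?_ (congrArg₂ Prod.mk ?_ rfl)
    · rw [t2, List.map_map, t1, pvSideEq cdn_sets h1 (fun c => PySem.Str.slice c none (some 1))]
    · rw [t2, pvSideEq cdn_sets h1 (fun c => PySem.Str.slice c none (some 2))]
  | true =>
    simp only [if_true]
    have hsplit : cdn_sets.foldl
        (fun (cnts : PySem.Dict String Int × PySem.Dict String Int) cdn_set =>
          (List.foldl (fun d p => d.insert p (d.getD p 0 + 1)) cnts.1 (PySem.Set.ofList (List.map (fun cdn => PySem.Str.slice cdn (some 2) none) cdn_set)),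
           List.foldl (fun d p => d.insert p (d.getD p 0 + 1)) cnts.2 (PySem.Set.ofList (List.map (fun cdn => PySem.Str.slice cdn (some 1) none) cdn_set))))
        (PySem.Dict.empty, PySem.Dict.empty)
      = (cdn_sets.foldl (fun d cdn_set => List.foldl (fun d p => d.insert p (d.getD p 0 + 1)) d (PySem.Set.ofList (List.map (fun cdn => PySem.Str.slice cdn (some 2) none) cdn_set))) PySem.Dict.empty,
         cdn_sets.foldl (fun d cdn_set => List.foldl (fun d p => d.insert p (d.getD p 0 + 1)) d (PySem.Set.ofList (List.map (fun cdn => PySem.Str.slice cdn (some 1) none) cdn_set))) PySem.Dict.empty) :=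
      PySem.List.foldl_prod_mk
        (fun (d : PySem.Dict String Int) cdn_set => List.foldl (fun d p => d.insert p (d.getD p 0 + 1)) d (PySem.Set.ofList (List.map (fun cdn => PySem.Str.slice cdn (some 2) none) cdn_set)))
        (fun (d : PySem.Dict String Int) cdn_set => List.foldl (fun d p => d.insert p (d.getD p 0 + 1)) d (PySem.Set.ofList (List.map (fun cdn => PySem.Str.slice cdn (some 1) none) cdn_set)))
        cdn_sets PySem.Dict.empty PySem.Dict.empty
    rw [hsplit]
    dsimp only
    have e2 : ∀ s ∈ cdn_sets, pvShrink 1 (1 - 1) s =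
        PySem.Set.ofList (s.map (fun c => PySem.Str.slice c (some 1) none)) :=
      fun s hs => pvShrinkEq _ _ _ s (fun c hc => by
        rw [show (1 - 1 : Int) = 0 from rfl]
        exact pvSliceR2 c (hall s hs c hc))
    have t2 : cdn_sets.map (pvShrink 1 (1 - 1)) =
        cdn_sets.map (fun s => PySem.Set.ofList (s.map (fun c => PySem.Str.slice c (some 1) none))) :=
      List.map_congr_left e2
    have t1 : List.map ((fun cdns => pvShrink 1 (1 - 1) cdns) ∘
          (fun s => PySem.Set.ofList (s.map (fun c => PySem.Str.slice c (some 1) none)))) cdn_sets =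
        cdn_sets.map (fun s => PySem.Set.ofList (s.map (fun c => PySem.Str.slice c (some 2) none))) :=
      List.map_congr_left (fun s hs => pvShrink2Eq 1 (1 - 1)
        (fun c => PySem.Str.slice c (some 1) none) (fun c => PySem.Str.slice c (some 2) none) s
        (fun c hc => by
          rw [show (1 - 1 : Int) = 0 from rfl]
          exact pvSliceR1 c (hall s hs c hc)))
    refine congrArg₂ Prod.mk ?_ (congrArg₂ Prod.mk ?_ rfl)
    · rw [t2, List.map_map, t1, pvSideEq cdn_sets h1 (fun c => PySem.Str.slice c (some 2) none)]
    · rw [t2, pvSideEq cdn_sets h1 (fun c => PySem.Str.slice c (some 1) none)]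

-- ===== VERDICT (by name: the statement is the Claim_ definition above) =====
theorem get_valid_patterns_py_spec : Claim_equal_get_valid_patterns_py := by
  intro cdn_sets reverse _hdom hpre
  unfold Spec_get_valid_patterns_py get_valid_patterns_py get_valid_patterns_py_alt
  rw [if_neg hpre.1, if_neg hpre.1]
  have hallb : (cdn_sets.all fun cdn_set => cdn_set.all fun cdn => PySem.Str.len cdn == 3) = true := by
    simp only [List.all_eq_true, beq_iff_eq]
    exact hpre.2
  have h2' : ¬((!(cdn_sets.all fun cdn_set => cdn_set.all fun cdn => PySem.Str.len cdn == 3)) = true) := by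
    rw [hallb]
    simp
  rw [if_neg h2', if_neg h2']
  dsimp only
  by_cases h3 : cdn_sets.length = 1
  · rw [if_pos h3, if_pos h3]
  · rw [if_neg h3, if_neg h3]
    exact pvMainBranch cdn_sets reverse hpre.1 hpre.2
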